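-- pv_equiv track=rewrite | github.com/kevin-heitfeld/geometric-flavor | archive/exploratory_scripts/scan_fixed_points.py | generate_SL2Z_elements
-- ===== SOURCE A (Python) =====
-- def generate_SL2Z_elements(max_c=20, max_d=20):
--     """
--     Generate elements of SL(2,ℤ) with bounded entries
--
--     For (a,b,c,d) with ad - bc = 1:
--     Given c, d, we can solve for a, b
--     """
--     elements = []
--
--     # Special case: c = 0 → d = ±1
--     for d in [1, -1]:
--         for b in range(-20, 21):
--             a = d  # Since ad - bc = 1 and c=0
--             elements.append((a, b, 0, d))
--
--     # General case: c ≠ 0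
--     for c in range(1, max_c + 1):
--         for d in range(-max_d, max_d + 1):
--             # Need ad - bc = 1
--             # For each b, solve for a: a = (1 + bc)/d
--             for b in range(-20, 21):
--                 if d == 0:
--                     continue
--                 numerator = 1 + b * c
--                 if numerator % d == 0:
--                     a = numerator // d
--                     # Verify
--                     if a * d - b * c == 1:
--                         elements.append((a, b, c, d))
--
--     # Also negative c
--     for c in range(1, max_c + 1):
--         for d in range(-max_d, max_d + 1):
--             c_neg = -c
--             for b in range(-20, 21):
--                 if d == 0:
--                     continue
--                 numerator = 1 + b * c_neg
--                 if numerator % d == 0: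
--                     a = numerator // d
--                     if a * d - b * c_neg == 1:
--                         elements.append((a, b, c_neg, d))
--
--     return elements
-- ===== SOURCE B (Python) =====
-- def _solutions(c, d):
--     """All (a, b, c, d) with -20 <= b <= 20 and a*d - b*c == 1, b ascending.
--
--     Solves b*c = -1 (mod |d|) once instead of testing every b."""
--     if d == 0:
--         return []
--     m = abs(d)
--     try:
--         inv = pow(c, -1, m)          # raises ValueError iff gcd(c, m) != 1
--     except ValueError:
--         return []
--     r = (-inv) % m                   # b must be = r (mod m)
--     out = []
--     b = -20 + (r + 20) % m           # smallest such b >= -20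
--     while b <= 20:
--         out.append(((1 + b * c) // d, b, c, d))
--         b += m
--     return out
--
--
-- def generate_SL2Z_elements(max_c=20, max_d=20):
--     elements = [(d, b, 0, d) for d in (1, -1) for b in range(-20, 21)]
--     for c in [c for c in range(1, max_c + 1)] + [-c for c in range(1, max_c + 1)]:
--         for d in range(-max_d, max_d + 1):
--             elements.extend(_solutions(c, d))
--     return elements
-- ===== Notes on version B (the rewrite author's own statement) =====
-- stated objective: faster
-- what changed: Instead of scanning all 41 values of b per (c,d) and testing (1+b*c)%d==0 (plus a redundant ad-bc==1 verify), B solves the congruence b*c = -1 (mod |d|) once per (c,d) via a modular inverse (pow(c,-1,|d|)) and enumerates only the solutions b as an arithmetic progression in [-20,20], skipping (c,d) entirely when gcd(c,|d|)!=1; block order and ascending-b order are preserved.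
import Mathlib
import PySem

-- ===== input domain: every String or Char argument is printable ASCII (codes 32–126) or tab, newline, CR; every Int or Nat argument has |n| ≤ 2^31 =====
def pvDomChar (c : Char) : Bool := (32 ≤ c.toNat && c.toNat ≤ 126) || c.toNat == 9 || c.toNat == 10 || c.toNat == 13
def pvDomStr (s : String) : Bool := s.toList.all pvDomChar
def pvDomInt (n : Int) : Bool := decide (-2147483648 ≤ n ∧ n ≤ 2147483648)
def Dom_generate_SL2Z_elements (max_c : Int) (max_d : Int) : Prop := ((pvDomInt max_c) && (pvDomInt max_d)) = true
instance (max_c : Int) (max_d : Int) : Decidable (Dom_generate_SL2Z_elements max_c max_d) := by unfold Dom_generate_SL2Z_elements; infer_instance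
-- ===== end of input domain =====

-- B replaces A's inner scan of all 41 b-values per (c, d) by solving b*c ≡ -1 (mod |d|) once with a
-- modular inverse and emitting only the solutions (objective: faster, constant-factor per (c, d)).

-- ===== PORT A =====
def generate_SL2Z_elements (max_c : Int) (max_d : Int) : List (Int × Int × Int × Int) :=
  let elements : List (Int × Int × Int × Int) :=
    ([1, -1] : List Int).foldl (fun els d =>
      (PySem.List.pyRange (-20) 21 1).foldl (fun els b => els ++ [(d, b, 0, d)]) els) []
  let elements :=
    (PySem.List.pyRange 1 (max_c + 1) 1).foldl (fun els c =>
      (PySem.List.pyRange (-max_d) (max_d + 1) 1).foldl (fun els d =>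
        (PySem.List.pyRange (-20) 21 1).foldl (fun els b =>
          if d = 0 then els
          else
            let numerator := 1 + b * c
            if PySem.Int.mod numerator d = 0 then
              let a := PySem.Int.floordiv numerator d
              if a * d - b * c = 1 then els ++ [(a, b, c, d)] else els
            else els) els) els) elements
  let elements :=
    (PySem.List.pyRange 1 (max_c + 1) 1).foldl (fun els c =>
      (PySem.List.pyRange (-max_d) (max_d + 1) 1).foldl (fun els d =>
        let c_neg := -c
        (PySem.List.pyRange (-20) 21 1).foldl (fun els b =>
          if d = 0 then els
          else
            let numerator := 1 + b * c_neg
            if PySem.Int.mod numerator d = 0 then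
              let a := PySem.Int.floordiv numerator d
              if a * d - b * c_neg = 1 then els ++ [(a, b, c_neg, d)] else els
            else els) els) els) elements
  elements

-- ===== PORT B =====
-- while-loop of Source B's _solutions: emit b, b+m, b+2*m, … while b ≤ 20.  The '1 ≤ m' conjunct in the
-- guard only makes the recursion total; every call site has m = |d| ≥ 1, where it never fires.
def pvStep (c d m b : Int) : List (Int × Int × Int × Int) :=
  if _h : b ≤ 20 ∧ 1 ≤ m then
    (PySem.Int.floordiv (1 + b * c) d, b, c, d) :: pvStep c d m (b + m)
  else []
  termination_by (21 - b).toNat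
  decreasing_by omega

-- Source B's _solutions.  Python's pow(c, -1, m) (m = |d| ≥ 1) raises ValueError iff Int.gcd c m ≠ 1 and
-- otherwise returns the unique inverse of c in [0, m): exactly (Int.gcdA c m) emod m by Bézout — the
-- try/except is ported as that gcd test (exact).  '%' with the positive modulus m is PySem.Int.mod.
def pvSolutions (c d : Int) : List (Int × Int × Int × Int) :=
  if d = 0 then []
  else
    let m := |d|
    if Int.gcd c m = 1 then
      let inv := PySem.Int.mod (Int.gcdA c m) m
      let r := PySem.Int.mod (-inv) m
      pvStep c d m (-20 + PySem.Int.mod (r + 20) m)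
    else []

def generate_SL2Z_elements_alt (max_c : Int) (max_d : Int) : List (Int × Int × Int × Int) :=
  (([1, -1] : List Int).flatMap (fun d =>
      (PySem.List.pyRange (-20) 21 1).map (fun b => (d, b, 0, d)))) ++
  ((PySem.List.pyRange 1 (max_c + 1) 1 ++
      (PySem.List.pyRange 1 (max_c + 1) 1).map (fun c => -c)).flatMap (fun c =>
    (PySem.List.pyRange (-max_d) (max_d + 1) 1).flatMap (fun d => pvSolutions c d)))

-- ===== PRECONDITION & SPEC =====
def Spec_generate_SL2Z_elements (max_c : Int) (max_d : Int) (out : List (Int × Int × Int × Int)) : Prop := out = generate_SL2Z_elements_alt max_c max_d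
instance (max_c : Int) (max_d : Int) (out : List (Int × Int × Int × Int)) : Decidable (Spec_generate_SL2Z_elements max_c max_d out) := by unfold Spec_generate_SL2Z_elements; infer_instance

-- ===== CLAIM (what is proved, stated in full; the proofs are below) =====
def Claim_equal_generate_SL2Z_elements : Prop := ∀ (max_c : Int) (max_d : Int), Dom_generate_SL2Z_elements max_c max_d → Spec_generate_SL2Z_elements max_c max_d (generate_SL2Z_elements max_c max_d)

-- ===== LEMMAS AND PROOFS =====

-- A's per-b decision, as an Option producer.
def pvSolA (c d b : Int) : Option (Int × Int × Int × Int) :=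
  if d = 0 then none
  else if PySem.Int.mod (1 + b * c) d = 0 then
    if (PySem.Int.floordiv (1 + b * c) d) * d - b * c = 1 then
      some (PySem.Int.floordiv (1 + b * c) d, b, c, d)
    else none
  else none

-- A's inner loop body appends exactly (pvSolA c d b).toList.
lemma pvBodyA_eq (c d : Int) (els : List (Int × Int × Int × Int)) (b : Int) :
    (if d = 0 then els
     else
       let numerator := 1 + b * c
       if PySem.Int.mod numerator d = 0 then
         let a := PySem.Int.floordiv numerator d
         if a * d - b * c = 1 then els ++ [(a, b, c, d)] else els
       else els) = els ++ (pvSolA c d b).toList := by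
  unfold pvSolA
  split_ifs <;> simp_all

-- A's verify 'a*d - b*c == 1' always succeeds when d ∣ 1 + b*c.
lemma pvSolA_of_ne (c d b : Int) (hd : d ≠ 0) :
    pvSolA c d b =
      if PySem.Int.mod (1 + b * c) d = 0
      then some (PySem.Int.floordiv (1 + b * c) d, b, c, d) else none := by
  unfold pvSolA
  rw [if_neg hd]
  by_cases hmod : PySem.Int.mod (1 + b * c) d = 0
  · rw [if_pos hmod, if_pos hmod, if_pos]
    have h := PySem.Int.floordiv_mul_add_mod (1 + b * c) d
    rw [hmod] at h
    omega
  · rw [if_neg hmod, if_neg hmod]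

-- no solutions when gcd(c, |d|) ≠ 1
lemma pvSolA_none_of_gcd_ne (c d b : Int) (hd : d ≠ 0) (hg : Int.gcd c (|d|) ≠ 1) :
    pvSolA c d b = none := by
  rw [pvSolA_of_ne c d b hd, if_neg]
  intro hmod
  apply hg
  have hdvd : d ∣ 1 + b * c := (PySem.Int.mod_eq_zero_iff_dvd _ _).mp hmod
  have h1 : (Int.gcd c (|d|) : Int) ∣ 1 := by
    have hc : (Int.gcd c (|d|) : Int) ∣ c := Int.gcd_dvd_left c (|d|)
    have hdd : (Int.gcd c (|d|) : Int) ∣ d := (dvd_abs _ _).mp (Int.gcd_dvd_right c (|d|))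
    have : (Int.gcd c (|d|) : Int) ∣ 1 + b * c := hdd.trans hdvd
    have := this.sub (hc.mul_left b)
    simpa using this
  have := Int.eq_one_of_dvd_one (by positivity) h1
  exact_mod_cast this

-- the congruence: with gcd(c, m) = 1 and r = (-(gcdA c m % m)) % m,  m ∣ 1 + b*c ↔ m ∣ b - r
lemma pvCong (c m b r : Int) (hg : Int.gcd c m = 1)
    (hr : r = (-(Int.gcdA c m % m)) % m) :
    m ∣ 1 + b * c ↔ m ∣ b - r := by
  have hBez : 1 = c * Int.gcdA c m + m * Int.gcdB c m := by
    have h := Int.gcd_eq_gcd_ab c m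
    rw [hg] at h
    exact_mod_cast h
  have h1 : Int.ModEq m r (-(Int.gcdA c m)) := by
    rw [hr]
    exact (Int.mod_modEq _ _).trans ((Int.mod_modEq (Int.gcdA c m) m).neg)
  have hrA : m ∣ Int.gcdA c m + r := by
    have h2 : m ∣ -(Int.gcdA c m) - r := Int.ModEq.dvd h1
    have h3 := dvd_neg.mpr h2
    have h4 : -(-(Int.gcdA c m) - r) = Int.gcdA c m + r := by ring
    rwa [h4] at h3
  obtain ⟨u, hu⟩ := hrA
  constructor
  · rintro ⟨k, hk⟩
    exact ⟨Int.gcdA c m * k + b * Int.gcdB c m - u, by linear_combination Int.gcdA c m * hk + b * hBez - hu⟩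
  · rintro ⟨k, hk⟩
    exact ⟨c * k + Int.gcdB c m + c * u, by linear_combination c * hk + hBez + c * hu⟩

-- arithmetic-progression enumeration = filter of the range by the congruence
lemma pvStep_eq_filterMap (c d m r : Int) (hm : 0 < m) :
    ∀ (n : Nat) (lo : Int), 21 - lo ≤ (n : Int) →
      pvStep c d m (lo + (r - lo) % m)
        = (PySem.List.pyRange lo 21 1).filterMap (fun b =>
            if (b - r) % m = 0 then some (PySem.Int.floordiv (1 + b * c) d, b, c, d) else none) := by
  intro n
  induction n with
  | zero =>
    intro lo hlo
    have hnn : 0 ≤ (r - lo) % m := Int.emod_nonneg _ (by omega)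
    rw [PySem.List.pyRange_one_eq_nil (by omega), List.filterMap_nil, pvStep,
      dif_neg (by omega : ¬(lo + (r - lo) % m ≤ 20 ∧ 1 ≤ m))]
  | succ k ih =>
    intro lo hlo
    have hnn : 0 ≤ (r - lo) % m := Int.emod_nonneg _ (by omega)
    by_cases hlo20 : 21 ≤ lo
    · rw [PySem.List.pyRange_one_eq_nil (by omega), List.filterMap_nil, pvStep,
        dif_neg (by omega : ¬(lo + (r - lo) % m ≤ 20 ∧ 1 ≤ m))]
    · have hlt : lo < 21 := by omega
      have hlt' : (r - lo) % m < m := Int.emod_lt_of_pos _ hm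
      rw [PySem.List.pyRange_one_cons hlt]
      by_cases he : (r - lo) % m = 0
      · -- lo is a solution; head matches, tail steps by m
        have hdvd : m ∣ r - lo := Int.dvd_of_emod_eq_zero he
        obtain ⟨t, ht⟩ := hdvd
        have hsol : (lo - r) % m = 0 := by
          apply Int.emod_eq_zero_of_dvd
          have := dvd_neg.mpr ⟨t, ht⟩
          have h4 : -(r - lo) = lo - r := by ring
          rwa [h4] at this
        rw [List.filterMap_cons_some (by rw [if_pos hsol])]
        rw [show lo + (r - lo) % m = lo from by omega]
        rw [pvStep, dif_pos ⟨by omega, by omega⟩]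
        congr 1
        have h1 : (r - (lo + 1)) % m = m - 1 := by
          rw [show r - (lo + 1) = (m - 1) + m * (t - 1) from by linear_combination ht,
            Int.add_mul_emod_self_left, Int.emod_eq_of_lt (by omega) (by omega)]
        rw [show lo + m = (lo + 1) + (r - (lo + 1)) % m from by omega]
        exact ih (lo + 1) (by omega)
      · -- lo is not a solution; the progression start is unchanged
        have h2 : 0 < (r - lo) % m := lt_of_le_of_ne hnn (Ne.symm he)
        have hsol : ¬ (lo - r) % m = 0 := by
          intro h0
          apply he
          apply Int.emod_eq_zero_of_dvd
          have h3 := dvd_neg.mpr (Int.dvd_of_emod_eq_zero h0)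
          have h4 : -(lo - r) = r - lo := by ring
          rwa [h4] at h3
        rw [List.filterMap_cons_none (by rw [if_neg hsol])]
        have hq : m ∣ (r - lo) - (r - lo) % m := by
          rw [Int.emod_def]
          exact ⟨(r - lo) / m, by ring⟩
        obtain ⟨t, ht⟩ := hq
        have h1 : (r - (lo + 1)) % m = (r - lo) % m - 1 := by
          rw [show r - (lo + 1) = ((r - lo) % m - 1) + m * t from by linear_combination ht,
            Int.add_mul_emod_self_left, Int.emod_eq_of_lt (by omega) (by omega)]
        rw [show lo + (r - lo) % m = (lo + 1) + (r - (lo + 1)) % m from by omega]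
        exact ih (lo + 1) (by omega)

-- per-(c,d) agreement: A's scan of b ∈ [-20, 20] produces exactly pvSolutions c d
lemma pvInner_eq (c d : Int) :
    (PySem.List.pyRange (-20) 21 1).filterMap (pvSolA c d) = pvSolutions c d := by
  by_cases hd : d = 0
  · subst hd
    unfold pvSolutions
    rw [if_pos rfl]
    apply List.filterMap_eq_nil_iff.mpr
    intro b _
    unfold pvSolA
    rw [if_pos rfl]
  · have hm : 0 < |d| := abs_pos.mpr hd
    unfold pvSolutions
    rw [if_neg hd]
    by_cases hg : Int.gcd c (|d|) = 1
    · rw [if_pos hg]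
      rw [List.filterMap_congr (g := fun b =>
        if (b - (-(Int.gcdA c (|d|) % |d|)) % |d|) % |d| = 0
        then some (PySem.Int.floordiv (1 + b * c) d, b, c, d) else none)
        (fun b _ => by
          beta_reduce
          rw [pvSolA_of_ne c d b hd]
          by_cases hcn : PySem.Int.mod (1 + b * c) d = 0
          · rw [if_pos hcn, if_pos]
            apply Int.emod_eq_zero_of_dvd
            exact (pvCong c (|d|) b _ hg rfl).mp
              ((abs_dvd d _).mpr ((PySem.Int.mod_eq_zero_iff_dvd _ _).mp hcn))
          · rw [if_neg hcn, if_neg]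
            intro h0
            apply hcn
            apply (PySem.Int.mod_eq_zero_iff_dvd _ _).mpr
            exact (abs_dvd d _).mp
              ((pvCong c (|d|) b _ hg rfl).mpr (Int.dvd_of_emod_eq_zero h0)))]
      show _ = pvStep c d (|d|) (-20 + PySem.Int.mod
        (PySem.Int.mod (-(PySem.Int.mod (Int.gcdA c (|d|)) (|d|))) (|d|) + 20) (|d|))
      rw [PySem.Int.mod_eq_emod_of_pos hm, PySem.Int.mod_eq_emod_of_pos hm,
        PySem.Int.mod_eq_emod_of_pos hm]
      rw [show (-20 : Int) + ((-(Int.gcdA c (|d|) % |d|)) % |d| + 20) % |d|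
            = -20 + ((-(Int.gcdA c (|d|) % |d|)) % |d| - (-20)) % |d| from by ring_nf]
      exact (pvStep_eq_filterMap c d (|d|) _ hm 41 (-20) (by omega)).symm
    · rw [if_neg hg]
      apply List.filterMap_eq_nil_iff.mpr
      intro b _
      exact pvSolA_none_of_gcd_ne c d b hd hg

-- A's inner b-loop, named for the assembly proof (definitionally the loop in both A-blocks)
def pvInnerA (c d : Int) (els : List (Int × Int × Int × Int)) : List (Int × Int × Int × Int) :=
  (PySem.List.pyRange (-20) 21 1).foldl (fun els b =>
    if d = 0 then els
    else
      let numerator := 1 + b * c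
      if PySem.Int.mod numerator d = 0 then
        let a := PySem.Int.floordiv numerator d
        if a * d - b * c = 1 then els ++ [(a, b, c, d)] else els
      else els) els

lemma pvInnerA_eq (c d : Int) (els : List (Int × Int × Int × Int)) :
    pvInnerA c d els = els ++ pvSolutions c d := by
  unfold pvInnerA
  rw [PySem.List.foldl_congr_mem _ _ (fun acc b => acc ++ (pvSolA c d b).toList) _
    (fun acc b _ => pvBodyA_eq c d acc b)]
  rw [PySem.List.foldl_append_eq_flatMap]
  rw [← List.filterMap_eq_flatMap_toList, pvInner_eq]

-- ===== VERDICT (by name: the statement is the Claim_ definition above) =====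
theorem generate_SL2Z_elements_spec : Claim_equal_generate_SL2Z_elements := by
  intro mc md _
  show generate_SL2Z_elements mc md = generate_SL2Z_elements_alt mc md
  have hblk : ∀ (f : Int → Int) (els : List (Int × Int × Int × Int)),
      (PySem.List.pyRange 1 (mc + 1) 1).foldl (fun els c =>
        (PySem.List.pyRange (-md) (md + 1) 1).foldl (fun els d => pvInnerA (f c) d els) els) els
      = els ++ (PySem.List.pyRange 1 (mc + 1) 1).flatMap (fun c =>
          (PySem.List.pyRange (-md) (md + 1) 1).flatMap (fun d => pvSolutions (f c) d)) := by
    intro f els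
    rw [PySem.List.foldl_congr_mem _ _ (fun els c =>
        els ++ (PySem.List.pyRange (-md) (md + 1) 1).flatMap (fun d => pvSolutions (f c) d)) _
      (fun acc c _ => by
        rw [PySem.List.foldl_congr_mem _ _ (fun els d => els ++ pvSolutions (f c) d) _
          (fun acc' d _ => pvInnerA_eq (f c) d acc')]
        exact PySem.List.foldl_append_eq_flatMap _ _ _)]
    exact PySem.List.foldl_append_eq_flatMap _ _ _
  have h2 : ∀ els : List (Int × Int × Int × Int),
      (PySem.List.pyRange 1 (mc + 1) 1).foldl (fun els c =>
        (PySem.List.pyRange (-md) (md + 1) 1).foldl (fun els d => pvInnerA c d els) els) els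
      = els ++ (PySem.List.pyRange 1 (mc + 1) 1).flatMap (fun c =>
          (PySem.List.pyRange (-md) (md + 1) 1).flatMap (fun d => pvSolutions c d)) :=
    fun els => hblk (fun c => c) els
  have h3 : ∀ els : List (Int × Int × Int × Int),
      (PySem.List.pyRange 1 (mc + 1) 1).foldl (fun els c =>
        (PySem.List.pyRange (-md) (md + 1) 1).foldl (fun els d => pvInnerA (-c) d els) els) els
      = els ++ (PySem.List.pyRange 1 (mc + 1) 1).flatMap (fun c =>
          (PySem.List.pyRange (-md) (md + 1) 1).flatMap (fun d => pvSolutions (-c) d)) :=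
    fun els => hblk (fun c => -c) els
  have h0 : (([1, -1] : List Int).foldl (fun els d =>
        (PySem.List.pyRange (-20) 21 1).foldl (fun els b => els ++ [(d, b, 0, d)]) els)
        ([] : List (Int × Int × Int × Int)))
      = ([1, -1] : List Int).flatMap (fun d =>
          (PySem.List.pyRange (-20) 21 1).map (fun b => (d, b, 0, d))) := by
    rw [PySem.List.foldl_congr_mem _ _ (fun els d =>
        els ++ (PySem.List.pyRange (-20) 21 1).map (fun b => (d, b, 0, d))) _
      (fun acc dd _ => PySem.List.foldl_append_singleton_eq_map _ _ _)]
    exact PySem.List.foldl_append_eq_flatMap _ _ _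
  calc generate_SL2Z_elements mc md
      = (PySem.List.pyRange 1 (mc + 1) 1).foldl (fun els c =>
          (PySem.List.pyRange (-md) (md + 1) 1).foldl (fun els d => pvInnerA (-c) d els) els)
          ((PySem.List.pyRange 1 (mc + 1) 1).foldl (fun els c =>
            (PySem.List.pyRange (-md) (md + 1) 1).foldl (fun els d => pvInnerA c d els) els)
            (([1, -1] : List Int).foldl (fun els d =>
              (PySem.List.pyRange (-20) 21 1).foldl (fun els b => els ++ [(d, b, 0, d)]) els)
              ([] : List (Int × Int × Int × Int)))) := rfl
    _ = generate_SL2Z_elements_alt mc md := by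
        rw [h3, h2, h0]
        unfold generate_SL2Z_elements_alt
        rw [List.flatMap_append, List.flatMap_map]
        simp [List.append_assoc]
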